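-- pv_equiv track=rewrite | github.com/oumburs9/Competitive-Programming | Leet Code Problems/Medium problems/#1170 Compare String by Frequency of the Smallest Character-medium.py | numSmallerByFrequency
-- ===== SOURCE A (Python) =====
-- from typing import List
--
-- def numSmallerByFrequency(queries: List[str], words: List[str]) -> List[int]:
--     def f(s):
--         return s.count(min(s))
--
--     words_freq_sorted = sorted(map(f, words))
--     n = len(words_freq_sorted)
--     #
--     def binary_search(arr, target):
--         left, right = 0, n
--         while left < right:
--             mid = left + (right - left) // 2
--             if arr[mid] <= target:
--                 left = mid + 1
--             else:
--                 right = mid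
--         return n - left
--
--     res = []
--     for query in queries:
--         query_freq = f(query)
--         res.append(binary_search(words_freq_sorted, query_freq))
--
--     return res
-- ===== SOURCE B (Python) =====
-- def numSmallerByFrequency(queries, words):
--     def f(s):
--         return s.count(min(s))
--
--     freqs = [f(w) for w in words]
--     return [sum(fw > f(q) for fw in freqs) for q in queries]
-- ===== Notes on version B (the rewrite author's own statement) =====
-- stated objective: simpler
-- what changed: A sorts the word frequencies and runs a hand-written binary-search loop per query; B drops the sort and the search entirely and directly counts, per query, the word frequencies strictly greater than the query frequency.
import Mathlib
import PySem

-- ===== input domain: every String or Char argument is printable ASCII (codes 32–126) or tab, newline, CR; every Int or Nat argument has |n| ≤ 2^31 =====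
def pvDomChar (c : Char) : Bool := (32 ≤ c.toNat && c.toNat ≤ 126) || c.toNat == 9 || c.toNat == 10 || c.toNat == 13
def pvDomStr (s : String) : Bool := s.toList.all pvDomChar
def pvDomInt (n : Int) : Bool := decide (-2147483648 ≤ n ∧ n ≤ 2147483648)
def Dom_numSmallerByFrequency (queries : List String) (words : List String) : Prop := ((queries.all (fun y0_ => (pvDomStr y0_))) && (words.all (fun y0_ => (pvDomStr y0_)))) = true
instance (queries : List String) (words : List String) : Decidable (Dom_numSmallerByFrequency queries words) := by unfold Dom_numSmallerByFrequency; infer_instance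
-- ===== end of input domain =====

-- B replaces A's sort + hand-written binary search with a direct per-query count
-- of word frequencies greater than the query frequency (simpler; same results).


-- ===== PORT A =====
-- f(s) = s.count(min(s)); min('') raises ValueError in Python (excluded by Pre_),
-- the 'none' branch is unreachable on admitted inputs.
def pyF (s : String) : Int :=
  match PySem.List.min? s.toList (fun c => c) with
  | some c => (s.toList.count c : Int)
  | none => 0

-- the 'while left < right' loop of A's binary_search; returns the final 'left'
def bsLoop (arr : List Int) (target : Int) (left right : Nat) : Nat :=
  if left < right then
    let mid := left + (right - left) / 2
    -- arr[mid]: mid is always in range inside the loop, so getD 0 is exact here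
    if (PySem.List.pyGet? arr (mid : Int)).getD 0 ≤ target then
      bsLoop arr target (mid + 1) right
    else
      bsLoop arr target left mid
  else left
termination_by right - left
decreasing_by all_goals omega

def numSmallerByFrequency (queries : List String) (words : List String) : List Int :=
  let wordsFreqSorted := PySem.List.sorted (words.map pyF) (fun x => x) false
  let n := wordsFreqSorted.length
  queries.map (fun query =>
    let queryFreq := pyF query
    ((n - bsLoop wordsFreqSorted queryFreq 0 n : Nat) : Int))

-- ===== PORT B =====
def numSmallerByFrequency_alt (queries : List String) (words : List String) : List Int :=
  let freqs := words.map pyF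
  queries.map (fun q =>
    let qf := pyF q
    (freqs.countP (fun fw => decide (qf < fw)) : Int))

-- ===== PRECONDITION & SPEC =====
-- Pre_ excludes inputs containing an empty string, on which Python A raises
-- ValueError (min of an empty sequence); Python B raises there too.
def Pre_numSmallerByFrequency (queries : List String) (words : List String) : Prop :=
  (∀ q ∈ queries, q ≠ "") ∧ (∀ w ∈ words, w ≠ "")
instance (queries : List String) (words : List String) : Decidable (Pre_numSmallerByFrequency queries words) := by unfold Pre_numSmallerByFrequency; infer_instance
def pvWitness_numSmallerByFrequency : List String × List String := (["cbd", "bbb"], ["zaaaz", "a", "aa"])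

def Spec_numSmallerByFrequency (queries : List String) (words : List String) (out : List Int) : Prop := out = numSmallerByFrequency_alt queries words
instance (queries : List String) (words : List String) (out : List Int) : Decidable (Spec_numSmallerByFrequency queries words out) := by unfold Spec_numSmallerByFrequency; infer_instance

-- ===== CLAIM (what is proved, stated in full; the proofs are below) =====
def Claim_equal_numSmallerByFrequency : Prop := ∀ (queries : List String) (words : List String), Dom_numSmallerByFrequency queries words → Pre_numSmallerByFrequency queries words → Spec_numSmallerByFrequency queries words (numSmallerByFrequency queries words)

-- ===== LEMMAS AND PROOFS =====

-- invariant of the binary-search loop: on a sorted array with the ≤-target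
-- elements exactly those below 'left' and the >-target ones from 'right' on,
-- it returns the split point l with arr[i] ≤ target ↔ i < l.
theorem bsLoop_spec (arr : List Int) (target : Int) :
    ∀ (left right : Nat), arr.Pairwise (· ≤ ·) → left ≤ right → right ≤ arr.length →
    (∀ i (h : i < arr.length), i < left → arr[i] ≤ target) →
    (∀ i (h : i < arr.length), right ≤ i → target < arr[i]) →
    left ≤ bsLoop arr target left right ∧ bsLoop arr target left right ≤ right ∧
      (∀ i (h : i < arr.length), arr[i] ≤ target ↔ i < bsLoop arr target left right) := by
  intro left right
  induction left, right using bsLoop.induct arr target with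
  | case1 left right hlt mid hle ih =>
    intro hp hlr hrn hlo hhi
    have hmid : mid < arr.length := by simp only [mid]; omega
    have hget : (PySem.List.pyGet? arr (mid : Int)).getD 0 = arr[mid] := by
      rw [PySem.List.pyGet?_natCast, List.getElem?_eq_getElem hmid]; rfl
    have hmle : arr[mid] ≤ target := by rw [← hget]; exact hle
    have hmono : ∀ i j (hi : i < arr.length) (hj : j < arr.length), i ≤ j → arr[i] ≤ arr[j] := by
      intro i j hi hj hij
      rcases Nat.eq_or_lt_of_le hij with rfl | h
      · exact le_refl _
      · exact List.pairwise_iff_getElem.mp hp i j hi hj h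
    have := ih hp (by omega) hrn
      (fun i hi hlt' => le_trans (hmono i mid hi hmid (by omega)) hmle) hhi
    have hstep : bsLoop arr target left right = bsLoop arr target (mid + 1) right := by
      rw [bsLoop, if_pos hlt, if_pos hle]
    rw [hstep]
    exact ⟨by omega, this.2.1, this.2.2⟩
  | case2 left right hlt mid hgt ih =>
    intro hp hlr hrn hlo hhi
    have hmid : mid < arr.length := by simp only [mid]; omega
    have hget : (PySem.List.pyGet? arr (mid : Int)).getD 0 = arr[mid] := by
      rw [PySem.List.pyGet?_natCast, List.getElem?_eq_getElem hmid]; rfl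
    have hmgt : target < arr[mid] := by rw [← hget]; exact lt_of_not_ge hgt
    have hmono : ∀ i j (hi : i < arr.length) (hj : j < arr.length), i ≤ j → arr[i] ≤ arr[j] := by
      intro i j hi hj hij
      rcases Nat.eq_or_lt_of_le hij with rfl | h
      · exact le_refl _
      · exact List.pairwise_iff_getElem.mp hp i j hi hj h
    have := ih hp (by omega) (by omega) hlo
      (fun i hi hge => lt_of_lt_of_le hmgt (hmono mid i hmid hi hge))
    have hstep : bsLoop arr target left right = bsLoop arr target left mid := by
      rw [bsLoop, if_pos hlt, if_neg hgt]
    rw [hstep]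
    exact ⟨this.1, by omega, this.2.2⟩
  | case3 left right hnlt =>
    intro hp hlr hrn hlo hhi
    rw [bsLoop, if_neg hnlt]
    refine ⟨le_refl _, hlr, fun i hi => ⟨fun hle => ?_, hlo i hi⟩⟩
    by_contra hge
    exact absurd (hhi i hi (by omega)) (not_lt.mpr hle)

-- countP of a predicate that holds exactly on the first l positions is l
theorem countP_of_split (p : Int → Bool) :
    ∀ (arr : List Int) (l : Nat), l ≤ arr.length →
    (∀ i (h : i < arr.length), p arr[i] ↔ i < l) → arr.countP p = l := by
  intro arr
  induction arr with
  | nil => intro l hl _; simp at hl ⊢; omega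
  | cons a t ih =>
    intro l hl hchar
    cases l with
    | zero =>
      have ha : ¬ p a := by simpa using (hchar 0 (by simp)).not.mpr (by omega)
      have : t.countP p = 0 := ih 0 (by omega)
        (fun i hi => by simpa using (hchar (i+1) (by simpa using Nat.succ_lt_succ hi)).not.mpr (by omega))
      simp [ha, this]
    | succ l' =>
      have ha : p a = true := (hchar 0 (by simp)).mpr (by omega)
      have : t.countP p = l' := ih l' (by simpa using hl)
        (fun i hi => by
          have h2 := hchar (i+1) (by simpa using Nat.succ_lt_succ hi)
          simp only [List.getElem_cons_succ] at h2
          exact ⟨fun hp' => by have := h2.mp hp'; omega, fun hi' => h2.mpr (by omega)⟩)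
      simp [ha, this]

-- an element of a list is ≤ t or > t, never both: the two counts partition the length
theorem countP_le_add_lt (t : Int) : ∀ (arr : List Int),
    arr.countP (fun x => decide (x ≤ t)) + arr.countP (fun x => decide (t < x)) = arr.length := by
  intro arr
  induction arr with
  | nil => simp
  | cons a s ihs =>
    by_cases h : a ≤ t
    · simp [h, not_lt.mpr h]
      omega
    · simp [h, lt_of_not_ge h]
      omega

-- ===== VERDICT (by name: the statement is the Claim_ definition above) =====
theorem numSmallerByFrequency_spec : Claim_equal_numSmallerByFrequency := by
  intro queries words _ _
  unfold Spec_numSmallerByFrequency numSmallerByFrequency numSmallerByFrequency_alt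
  apply List.map_congr_left
  intro q _
  set arr := PySem.List.sorted (words.map pyF) (fun x => x) false with harr
  have hperm : arr.Perm (words.map pyF) := PySem.List.sorted_perm _ _ _
  have hpair : arr.Pairwise (· ≤ ·) := by
    have := PySem.List.sorted_pairwise (words.map pyF) (fun x => x)
    simpa using this
  set t := pyF q with ht
  have hbs := bsLoop_spec arr t 0 arr.length hpair (Nat.zero_le _) le_rfl
    (fun i hi h => by omega) (fun i hi h => by omega)
  set l := bsLoop arr t 0 arr.length with hl
  have hle : arr.countP (fun x => decide (x ≤ t)) = l :=
    countP_of_split _ arr l hbs.2.1 (fun i hi => by simpa using hbs.2.2 i hi)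
  have hsum := countP_le_add_lt t arr
  have hcnt : (words.map pyF).countP (fun fw => decide (t < fw)) = arr.countP (fun x => decide (t < x)) :=
    (hperm.countP_eq _).symm
  show (((arr.length - bsLoop arr t 0 arr.length : Nat)) : Int)
      = ((words.map pyF).countP (fun fw => decide (t < fw)) : Int)
  rw [hcnt]
  have hlub := hbs.2.1
  omega
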